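-- pv_equiv track=rewrite | github.com/teryfly/CodeFileExecutorLib | src/codefileexecutorlib/core/parser.py | validate_task_structure
-- ===== SOURCE A (Python) =====
-- from typing import List, Tuple
--
-- def validate_task_structure(lines: List[str]) -> Tuple[bool, str, str, str]:
--     step = action = path = None
--     for line in lines:
--         line_stripped = line.strip()
--         if line_stripped.startswith("Step"):
--             step = line_stripped
--         elif line_stripped.startswith("Action:"):
--             action = line_stripped
--         elif line_stripped.startswith("File Path:"):
--             path = line_stripped
--     valid = bool(step and action and path)
--     return (valid, step or "", action or "", path or "")
-- ===== SOURCE B (Python) =====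
-- from typing import List, Tuple
--
-- def validate_task_structure(lines: List[str]) -> Tuple[bool, str, str, str]:
--     stripped = [line.strip() for line in lines]
--
--     def last_with(prefix: str) -> str:
--         matches = [s for s in stripped if s.startswith(prefix)]
--         return matches[-1] if matches else ""
--
--     step = last_with("Step")
--     action = last_with("Action:")
--     path = last_with("File Path:")
--     return (bool(step and action and path), step, action, path)
-- ===== Notes on version B (the rewrite author's own statement) =====
-- stated objective: simpler
-- what changed: Replaces the single stateful loop with three mutually-exclusive-prefix overwrite branches by three independent filter passes, each taking the last matching stripped line (or empty).
import Mathlib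
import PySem

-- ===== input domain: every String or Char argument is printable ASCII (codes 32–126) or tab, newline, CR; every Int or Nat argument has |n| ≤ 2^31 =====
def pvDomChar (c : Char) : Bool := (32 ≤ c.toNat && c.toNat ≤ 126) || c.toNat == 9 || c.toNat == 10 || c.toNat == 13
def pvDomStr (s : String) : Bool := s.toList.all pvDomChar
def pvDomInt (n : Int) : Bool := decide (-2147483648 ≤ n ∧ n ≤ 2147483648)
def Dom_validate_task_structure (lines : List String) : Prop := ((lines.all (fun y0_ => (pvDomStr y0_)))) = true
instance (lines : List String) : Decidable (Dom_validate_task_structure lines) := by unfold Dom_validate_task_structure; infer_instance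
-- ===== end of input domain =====

-- B replaces A's single stateful elif loop by three independent last-match filter passes (simpler, same O(n) cost).

-- ===== PORT A =====
-- Python truthiness / `x or ""` on an Optional[str]
def pyTruthyStr (o : Option String) : Bool :=
  match o with
  | none => false
  | some s => decide (s ≠ "")

def pyOrEmptyStr (o : Option String) : String :=
  match o with
  | none => ""
  | some s => s

def vtsLoop (st : Option String × Option String × Option String) (line : String) :
    Option String × Option String × Option String :=
  let ls := PySem.Str.strip line
  if PySem.Str.startswith ls "Step" then (some ls, st.2.1, st.2.2)
  else if PySem.Str.startswith ls "Action:" then (st.1, some ls, st.2.2)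
  else if PySem.Str.startswith ls "File Path:" then (st.1, st.2.1, some ls)
  else st

def validate_task_structure (lines : List String) : Bool × String × String × String :=
  let st := lines.foldl vtsLoop (none, none, none)
  (pyTruthyStr st.1 && pyTruthyStr st.2.1 && pyTruthyStr st.2.2,
   pyOrEmptyStr st.1, pyOrEmptyStr st.2.1, pyOrEmptyStr st.2.2)

-- ===== PORT B =====
-- `matches[-1] if matches else ""` (pyGet? at -1 is none exactly when the list is empty)
def vtsLastWith (stripped : List String) (pre : String) : String :=
  match PySem.List.pyGet? (stripped.filter (fun s => PySem.Str.startswith s pre)) (-1) with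
  | some x => x
  | none => ""

def validate_task_structure_alt (lines : List String) : Bool × String × String × String :=
  let stripped := lines.map PySem.Str.strip
  let step := vtsLastWith stripped "Step"
  let action := vtsLastWith stripped "Action:"
  let path := vtsLastWith stripped "File Path:"
  (decide (step ≠ "") && decide (action ≠ "") && decide (path ≠ ""), step, action, path)

-- ===== PRECONDITION & SPEC =====
def Spec_validate_task_structure (lines : List String) (out : Bool × String × String × String) : Prop := out = validate_task_structure_alt lines
instance (lines : List String) (out : Bool × String × String × String) : Decidable (Spec_validate_task_structure lines out) := by unfold Spec_validate_task_structure; infer_instance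

-- ===== CLAIM (what is proved, stated in full; the proofs are below) =====
def Claim_equal_validate_task_structure : Prop := ∀ (lines : List String), Dom_validate_task_structure lines → Spec_validate_task_structure lines (validate_task_structure lines)

-- ===== LEMMAS AND PROOFS =====

-- last match of prefix `pre` in `ss`, falling back to `init`
def vtsLast (ss : List String) (pre : String) (init : Option String) : Option String :=
  match (ss.filter (fun s => PySem.Str.startswith s pre)).getLast? with
  | some x => some x
  | none => init

theorem prefix_head_eq {α : Type} {a b : α} {t1 t2 l : List α}
    (h1 : (a :: t1) <+: l) (h2 : (b :: t2) <+: l) : a = b := by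
  obtain ⟨u, hu⟩ := h1
  obtain ⟨v, hv⟩ := h2
  rw [← hu] at hv
  have hh := congrArg List.head? hv
  simp only [List.cons_append, List.head?_cons, Option.some.injEq] at hh
  exact hh.symm

theorem sw_excl {s p q : String} (hp : p.toList ≠ []) (hq' : q.toList ≠ [])
    (hpq : p.toList.head? ≠ q.toList.head?)
    (h : PySem.Str.startswith s p = true) : PySem.Str.startswith s q = false := by
  by_contra hqc
  rw [Bool.not_eq_false] at hqc
  rw [PySem.Str.startswith_eq, PySem.Chars.startswith_iff] at h hqc
  cases hP : p.toList with
  | nil => exact hp hP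
  | cons a t1 =>
    cases hQ : q.toList with
    | nil => exact hq' hQ
    | cons b t2 =>
      rw [hP] at h
      rw [hQ] at hqc
      apply hpq
      rw [hP, hQ]
      simp [prefix_head_eq h hqc]

theorem vtsLast_cons (s : String) (ss : List String) (pre : String) (init : Option String) :
    vtsLast (s :: ss) pre init =
      if PySem.Str.startswith s pre then vtsLast ss pre (some s) else vtsLast ss pre init := by
  unfold vtsLast
  rw [List.filter_cons]
  by_cases h : PySem.Str.startswith s pre = true
  · rw [if_pos h, if_pos h]
    cases hl : (ss.filter (fun t => PySem.Str.startswith t pre)) with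
    | nil => rfl
    | cons y ys =>
      rw [List.getLast?_cons_cons]
      cases hgl : (y :: ys).getLast? with
      | none => simp at hgl
      | some x => rfl
  · rw [if_neg h, if_neg h]

theorem vtsFold_eq (lines : List String) :
    ∀ (a b c : Option String),
    lines.foldl vtsLoop (a, b, c) =
      (vtsLast (lines.map PySem.Str.strip) "Step" a,
       vtsLast (lines.map PySem.Str.strip) "Action:" b,
       vtsLast (lines.map PySem.Str.strip) "File Path:" c) := by
  induction lines with
  | nil => intro a b c; simp [vtsLast]
  | cons l ls ih =>
    intro a b c
    rw [List.foldl_cons, List.map_cons]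
    rw [vtsLast_cons, vtsLast_cons, vtsLast_cons]
    show ls.foldl vtsLoop (vtsLoop (a, b, c) l) = _
    unfold vtsLoop
    by_cases h1 : PySem.Str.startswith (PySem.Str.strip l) "Step" = true
    · have h2 := sw_excl (s := PySem.Str.strip l) (p := "Step") (q := "Action:")
        (by decide) (by decide) (by decide) h1
      have h3 := sw_excl (s := PySem.Str.strip l) (p := "Step") (q := "File Path:")
        (by decide) (by decide) (by decide) h1
      rw [if_pos h1, if_pos h1, if_neg (by simpa using h2), if_neg (by simpa using h3)]
      exact ih (some (PySem.Str.strip l)) b c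
    · rw [if_neg h1, if_neg h1]
      by_cases h2 : PySem.Str.startswith (PySem.Str.strip l) "Action:" = true
      · have h3 := sw_excl (s := PySem.Str.strip l) (p := "Action:") (q := "File Path:")
          (by decide) (by decide) (by decide) h2
        rw [if_pos h2, if_pos h2, if_neg (by simpa using h3)]
        exact ih a (some (PySem.Str.strip l)) c
      · rw [if_neg h2, if_neg h2]
        by_cases h3 : PySem.Str.startswith (PySem.Str.strip l) "File Path:" = true
        · rw [if_pos h3, if_pos h3]
          exact ih a b (some (PySem.Str.strip l))
        · rw [if_neg h3, if_neg h3]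
          exact ih a b c

theorem pyGet_neg_one (l : List String) : PySem.List.pyGet? l (-1) = l.getLast? := by
  cases l with
  | nil => rfl
  | cons x xs =>
    simp [PySem.List.pyGet?, PySem.List.pyIdx?, List.getLast?_eq_getElem?]

theorem vtsLastWith_eq (ss : List String) (pre : String) :
    vtsLastWith ss pre = pyOrEmptyStr (vtsLast ss pre none) := by
  unfold vtsLastWith vtsLast
  rw [pyGet_neg_one]
  cases (ss.filter (fun s => PySem.Str.startswith s pre)).getLast? <;> rfl

theorem pyTruthy_eq (o : Option String) : pyTruthyStr o = decide (pyOrEmptyStr o ≠ "") := by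
  cases o <;> simp [pyTruthyStr, pyOrEmptyStr]

-- ===== VERDICT (by name: the statement is the Claim_ definition above) =====
theorem validate_task_structure_spec : Claim_equal_validate_task_structure := by
  intro lines _
  show validate_task_structure lines = validate_task_structure_alt lines
  unfold validate_task_structure validate_task_structure_alt
  rw [vtsFold_eq lines none none none]
  simp only [vtsLastWith_eq, pyTruthy_eq]
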